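-- pv_equiv track=rewrite | github.com/zhoujingyu5-arch/mybook | report_scraper.py | categorize_reports
-- ===== SOURCE A (Python) =====
-- def categorize_reports(reports):
--     """按类别分类研报"""
--     categories = {
--         "宏观策略": [],
--         "行业研究": [],
--         "个股研报": [],
--         "晨会纪要": [],
--         "其他": []
--     }
--
--     for report in reports:
--         cat = report.get("category", "其他")
--         if cat in categories:
--             categories[cat].append(report)
--         else:
--             categories["其他"].append(report)
--
--     return categories
-- ===== SOURCE B (Python) =====
-- def categorize_reports(reports):
--     """按类别分类研报"""
--     known = ["宏观策略", "行业研究", "个股研报", "晨会纪要"]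
--     result = {name: [r for r in reports if r.get("category", "其他") == name]
--               for name in known}
--     result["其他"] = [r for r in reports if r.get("category", "其他") not in known]
--     return result
-- ===== Notes on version B (the rewrite author's own statement) =====
-- stated objective: alternative
-- what changed: Replaces the single branching pass that mutates dict buckets with five independent order-preserving filters of the input, one per fixed category (the fifth collecting everything whose category is not one of the four named ones).
import Mathlib
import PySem

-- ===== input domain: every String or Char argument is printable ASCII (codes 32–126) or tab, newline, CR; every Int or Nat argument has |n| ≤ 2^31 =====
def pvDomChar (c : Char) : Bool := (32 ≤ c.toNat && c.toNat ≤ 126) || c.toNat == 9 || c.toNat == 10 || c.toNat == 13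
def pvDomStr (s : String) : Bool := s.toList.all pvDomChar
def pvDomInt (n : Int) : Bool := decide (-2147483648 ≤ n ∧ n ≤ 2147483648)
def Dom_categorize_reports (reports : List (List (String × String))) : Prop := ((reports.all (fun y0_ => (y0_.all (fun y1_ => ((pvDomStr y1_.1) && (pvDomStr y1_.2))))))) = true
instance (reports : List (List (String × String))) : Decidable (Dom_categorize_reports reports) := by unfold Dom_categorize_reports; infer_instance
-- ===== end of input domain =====

-- B groups by five independent per-category filters instead of A's single branching pass over mutable dict buckets (same O(n) cost, different decomposition).

-- ===== PORT A =====
-- report.get("category", "其他")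
def pvGetCat (report : List (String × String)) : String :=
  (PySem.Dict.mk report).getD "category" "其他"

-- one iteration of A's for-loop
def pvStepA (cats : PySem.Dict String (List (List (String × String))))
    (report : List (String × String)) : PySem.Dict String (List (List (String × String))) :=
  let cat := pvGetCat report
  if cats.contains cat then cats.modify cat [] (· ++ [report])
  else cats.modify "其他" [] (· ++ [report])

def categorize_reports (reports : List (List (String × String))) : List (String × List (List (String × String))) :=
  let categories : PySem.Dict String (List (List (String × String))) :=
    (((((PySem.Dict.empty).insert "宏观策略" []).insert "行业研究" []).insert "个股研报" []).insert "晨会纪要" []).insert "其他" []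
  (reports.foldl pvStepA categories).items

-- ===== PORT B =====
def pvKnown : List String := ["宏观策略", "行业研究", "个股研报", "晨会纪要"]

def categorize_reports_alt (reports : List (List (String × String))) : List (String × List (List (String × String))) :=
  (pvKnown.map (fun name => (name, reports.filter (fun r => pvGetCat r == name))))
    ++ [("其他", reports.filter (fun r => !(pvKnown.contains (pvGetCat r))))]

-- ===== PRECONDITION & SPEC =====
def Spec_categorize_reports (reports : List (List (String × String))) (out : List (String × List (List (String × String)))) : Prop := out = categorize_reports_alt reports
instance (reports : List (List (String × String))) (out : List (String × List (List (String × String)))) : Decidable (Spec_categorize_reports reports out) := by unfold Spec_categorize_reports; infer_instance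

-- ===== CLAIM (what is proved, stated in full; the proofs are below) =====
def Claim_equal_categorize_reports : Prop := ∀ (reports : List (List (String × String))), Dom_categorize_reports reports → Spec_categorize_reports reports (categorize_reports reports)

-- ===== LEMMAS AND PROOFS =====
-- the literal 5-bucket state A's loop maintains
def pvSt (a b c d e : List (List (String × String))) : PySem.Dict String (List (List (String × String))) :=
  PySem.Dict.mk [("宏观策略", a), ("行业研究", b), ("个股研报", c), ("晨会纪要", d), ("其他", e)]

lemma pvStepA_St (a b c d e : List (List (String × String))) (r : List (String × String)) :
    pvStepA (pvSt a b c d e) r =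
      if pvGetCat r = "宏观策略" then pvSt (a ++ [r]) b c d e
      else if pvGetCat r = "行业研究" then pvSt a (b ++ [r]) c d e
      else if pvGetCat r = "个股研报" then pvSt a b (c ++ [r]) d e
      else if pvGetCat r = "晨会纪要" then pvSt a b c (d ++ [r]) e
      else pvSt a b c d (e ++ [r]) := by
  by_cases h1 : pvGetCat r = "宏观策略"
  · simp only [pvStepA, h1]; rfl
  · rw [if_neg h1]
    by_cases h2 : pvGetCat r = "行业研究"
    · simp only [pvStepA, h2]; rfl
    · rw [if_neg h2]
      by_cases h3 : pvGetCat r = "个股研报"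
      · simp only [pvStepA, h3]; rfl
      · rw [if_neg h3]
        by_cases h4 : pvGetCat r = "晨会纪要"
        · simp only [pvStepA, h4]; rfl
        · rw [if_neg h4]
          by_cases h5 : pvGetCat r = "其他"
          · simp only [pvStepA, h5]; rfl
          · have hc : (pvSt a b c d e).contains (pvGetCat r) = false := by
              simp [pvSt, PySem.Dict.contains_mk, Ne.symm h1, Ne.symm h2, Ne.symm h3, Ne.symm h4, Ne.symm h5]
            simp only [pvStepA, hc, Bool.false_eq_true, if_false]
            rfl

-- B's "其他" predicate, as the conjunction the loop analysis produces
def pvOther (r : List (String × String)) : Bool :=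
  !(pvGetCat r == "宏观策略") && !(pvGetCat r == "行业研究") && !(pvGetCat r == "个股研报") && !(pvGetCat r == "晨会纪要")

lemma pvLoop_St (l : List (List (String × String))) :
    ∀ a b c d e, l.foldl pvStepA (pvSt a b c d e) =
      pvSt (a ++ l.filter (fun r => pvGetCat r == "宏观策略"))
           (b ++ l.filter (fun r => pvGetCat r == "行业研究"))
           (c ++ l.filter (fun r => pvGetCat r == "个股研报"))
           (d ++ l.filter (fun r => pvGetCat r == "晨会纪要"))
           (e ++ l.filter pvOther) := by
  induction l with
  | nil => intro a b c d e; simp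
  | cons r l ih =>
    intro a b c d e
    simp only [List.foldl_cons, pvStepA_St, List.filter_cons, pvOther]
    by_cases h1 : pvGetCat r = "宏观策略"
    · simp [h1, ih]
    · by_cases h2 : pvGetCat r = "行业研究"
      · simp [h2, ih]
      · by_cases h3 : pvGetCat r = "个股研报"
        · simp [h3, ih]
        · by_cases h4 : pvGetCat r = "晨会纪要"
          · simp [h4, ih]
          · simp [h1, h2, h3, h4, ih]

lemma pvOther_eq_not_known (l : List (List (String × String))) :
    l.filter pvOther = l.filter (fun r => !(pvKnown.contains (pvGetCat r))) := by
  apply List.filter_congr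
  intro x _
  simp [pvOther, pvKnown, beq_eq_decide, Bool.and_assoc]

-- ===== VERDICT (by name: the statement is the Claim_ definition above) =====
theorem categorize_reports_spec : Claim_equal_categorize_reports := by
  intro reports _
  show categorize_reports reports = categorize_reports_alt reports
  have hinit : (((((PySem.Dict.empty).insert "宏观策略" ([] : List (List (String × String)))).insert "行业研究" []).insert "个股研报" []).insert "晨会纪要" []).insert "其他" [] = pvSt [] [] [] [] [] := by
    rfl
  simp only [categorize_reports, hinit, pvLoop_St, pvOther_eq_not_known, List.nil_append]
  simp [pvSt, categorize_reports_alt, pvKnown]
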